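-- pv_equiv track=rewrite | github.com/EmilyHurn/Scripts | nmap_scan.py | expand_ip_pattern
-- ===== SOURCE A (Python) =====
-- from itertools import product
--
-- def expand_ip_pattern(ip_pattern):
--     """Expand IP patterns like:
--     192.168.1.10
--     192.168.[1-9].10
--     192.168.1.[12,34,157]
--     192.168.[4,6].[10-190]
--     """
--     segments = ip_pattern.split('.')
--     expanded_segments = []
--
--     for segment in segments:
--         # Handle bracket notation
--         if '[' in segment and ']' in segment:
--             content = segment[segment.index('[')+1:segment.index(']')]
--             parts = []
--
--             # Handle comma-separated items
--             for item in content.split(','):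
--                 item = item.strip()
--                 # Handle range (e.g., 1-9)
--                 if '-' in item:
--                     start, end = map(int, item.split('-'))
--                     parts.extend(range(start, end+1))
--                 else:
--                     parts.append(int(item))
--             expanded_segments.append([str(x) for x in parts])
--         else:
--             expanded_segments.append([segment])
--
--     # Generate all combinations
--     ips = []
--     for combination in product(*expanded_segments):
--         ips.append('.'.join(combination))
--
--     return ips
-- ===== SOURCE B (Python) =====
-- def expand_ip_pattern(ip_pattern):
--     """Expand IP patterns like 192.168.[1-9].10 into the full list of IPs."""
--     def item_values(item):
--         item = item.strip()
--         if '-' in item: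
--             lo, hi = item.split('-')
--             return range(int(lo), int(hi) + 1)
--         return [int(item)]
--
--     def seg_options(segment):
--         if '[' in segment and ']' in segment:
--             content = segment[segment.index('[') + 1:segment.index(']')]
--             return [str(x) for item in content.split(',') for x in item_values(item)]
--         return [segment]
--
--     segments = ip_pattern.split('.')
--     acc = seg_options(segments[0])
--     for seg in segments[1:]:
--         opts = seg_options(seg)
--         acc = [p + '.' + o for p in acc for o in opts]
--     return acc
-- ===== Notes on version B (the rewrite author's own statement) =====
-- stated objective: alternative
-- what changed: The itertools.product enumeration over all expanded segments is replaced by a single left fold that maintains a running list of partial IP prefixes, extending each prefix with the next segment's options (same order, last segment varying fastest).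
import Mathlib
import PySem

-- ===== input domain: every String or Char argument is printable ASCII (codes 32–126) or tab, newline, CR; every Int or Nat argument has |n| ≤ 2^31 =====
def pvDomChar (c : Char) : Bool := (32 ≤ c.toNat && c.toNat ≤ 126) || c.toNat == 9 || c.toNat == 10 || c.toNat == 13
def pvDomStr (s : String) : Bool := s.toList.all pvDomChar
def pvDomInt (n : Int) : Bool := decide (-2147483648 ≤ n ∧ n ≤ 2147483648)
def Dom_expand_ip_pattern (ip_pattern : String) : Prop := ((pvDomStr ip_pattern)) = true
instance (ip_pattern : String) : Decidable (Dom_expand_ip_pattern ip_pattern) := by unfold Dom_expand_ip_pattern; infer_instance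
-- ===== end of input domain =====

-- B replaces A's itertools.product enumeration by a left fold that maintains a running
-- list of partial IP prefixes (objective: alternative decomposition, same cost and order).


-- ===== PORT A =====
-- per-segment option list; `none` = a ValueError of int()/unpacking (excluded by Pre_).
-- segment.index('[') = Str.find here because the branch guard guarantees presence.
def pvSegOptionsA (segment : String) : Option (List String) :=
  if PySem.Str.isIn "[" segment && PySem.Str.isIn "]" segment then
    let content := PySem.Str.slice segment
      (some (PySem.Str.find segment "[" + 1)) (some (PySem.Str.find segment "]"))
    let parts? := ((PySem.Str.split? content ",").getD []).foldl
      (fun parts? item =>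
        parts?.bind (fun parts =>
          let it := PySem.Str.strip item
          if PySem.Str.isIn "-" it then
            match PySem.Str.split? it "-" with
            | some [a, b] =>
              match PySem.Int.ofStr? a, PySem.Int.ofStr? b with
              | some st, some en => some (parts ++ PySem.List.pyRange st (en + 1) 1)
              | _, _ => none
            | _ => none
          else (PySem.Int.ofStr? it).map (fun n => parts ++ [n])))
      (some [])
    parts?.map (fun parts => parts.map PySem.Int.toStr)
  else some [segment]

-- itertools.product(*lists), as lists (last factor varies fastest)
def pvProductA : List (List String) → List (List String)
  | [] => [[]]
  | l :: ls => l.flatMap (fun x => (pvProductA ls).map (fun r => x :: r))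

def expand_ip_pattern (ip_pattern : String) : List String :=
  let segments := (PySem.Str.split? ip_pattern ".").getD []   -- sep "." ≠ "": getD unreachable
  match segments.foldl
      (fun acc seg => acc.bind (fun es => (pvSegOptionsA seg).map (fun l => es ++ [l])))
      (some []) with
  | none => []   -- Python raised ValueError here; excluded by Pre_
  | some es => (pvProductA es).foldl (fun ips comb => ips ++ [PySem.Str.join "." comb]) []

-- ===== PORT B =====
-- item_values: the integers one comma item stands for (none = ValueError)
def pvItemVals (item : String) : Option (List Int) :=
  let it := PySem.Str.strip item
  if PySem.Str.isIn "-" it then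
    match PySem.Str.split? it "-" with
    | some [lo, hi] =>
      match PySem.Int.ofStr? lo, PySem.Int.ofStr? hi with
      | some a, some b => some (PySem.List.pyRange a (b + 1) 1)
      | _, _ => none
    | _ => none
  else (PySem.Int.ofStr? it).map (fun n => [n])

-- the flattening comprehension [str(x) for item in items for x in item_values(item)],
-- threaded through Option because item_values can raise
def pvItemValsList : List String → Option (List (List Int))
  | [] => some []
  | i :: t => (pvItemVals i).bind (fun vs => (pvItemValsList t).map (vs :: ·))

def pvSegOptionsB (segment : String) : Option (List String) :=
  if PySem.Str.isIn "[" segment && PySem.Str.isIn "]" segment then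
    (pvItemValsList ((PySem.Str.split? (PySem.Str.slice segment
        (some (PySem.Str.find segment "[" + 1)) (some (PySem.Str.find segment "]"))) ",").getD [])).map
      (fun vss => vss.flatten.map PySem.Int.toStr)
  else some [segment]

def expand_ip_pattern_alt (ip_pattern : String) : List String :=
  match (PySem.Str.split? ip_pattern ".").getD [] with
  | [] => []   -- unreachable: str.split('.') never returns an empty list
  | s0 :: rest =>
    (rest.foldl
      (fun acc? seg =>
        acc?.bind (fun acc => (pvSegOptionsB seg).map (fun opts =>
          acc.flatMap (fun p => opts.map (fun o => p ++ "." ++ o)))))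
      (pvSegOptionsB s0)).getD []

-- ===== PRECONDITION & SPEC =====
-- Pre_ excludes exactly the inputs where Python raises ValueError while parsing a
-- bracketed segment (non-integer item, empty content, a '-' item that does not split
-- into two integers, ']' before '['); both A and B raise there.
def pvItemOK (item : String) : Bool :=
  let it := PySem.Str.strip item
  if PySem.Str.isIn "-" it then
    match PySem.Str.split? it "-" with
    | some [a, b] => (PySem.Int.ofStr? a).isSome && (PySem.Int.ofStr? b).isSome
    | _ => false
  else (PySem.Int.ofStr? it).isSome

def pvSegOK (seg : String) : Bool :=
  !(PySem.Str.isIn "[" seg && PySem.Str.isIn "]" seg) ||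
    ((PySem.Str.split? (PySem.Str.slice seg
        (some (PySem.Str.find seg "[" + 1)) (some (PySem.Str.find seg "]"))) ",").getD []).all pvItemOK

def Pre_expand_ip_pattern (ip_pattern : String) : Prop :=
  ((PySem.Str.split? ip_pattern ".").getD []).all pvSegOK = true
instance (ip_pattern : String) : Decidable (Pre_expand_ip_pattern ip_pattern) := by
  unfold Pre_expand_ip_pattern; infer_instance

def pvWitness_expand_ip_pattern : String := "192.168.[1-3].[12,34]"

def Spec_expand_ip_pattern (ip_pattern : String) (out : List String) : Prop := out = expand_ip_pattern_alt ip_pattern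
instance (ip_pattern : String) (out : List String) : Decidable (Spec_expand_ip_pattern ip_pattern out) := by unfold Spec_expand_ip_pattern; infer_instance

-- ===== CLAIM (what is proved, stated in full; the proofs are below) =====
def Claim_equal_expand_ip_pattern : Prop := ∀ (ip_pattern : String), Dom_expand_ip_pattern ip_pattern → Pre_expand_ip_pattern ip_pattern → Spec_expand_ip_pattern ip_pattern (expand_ip_pattern ip_pattern)


-- ===== LEMMAS AND PROOFS =====
-- named forms of the loop bodies (for the proofs; definitionally equal to the ports' lambdas)
def pvStepItemA (parts? : Option (List Int)) (item : String) : Option (List Int) :=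
  parts?.bind (fun parts =>
    let it := PySem.Str.strip item
    if PySem.Str.isIn "-" it then
      match PySem.Str.split? it "-" with
      | some [a, b] =>
        match PySem.Int.ofStr? a, PySem.Int.ofStr? b with
        | some st, some en => some (parts ++ PySem.List.pyRange st (en + 1) 1)
        | _, _ => none
      | _ => none
    else (PySem.Int.ofStr? it).map (fun n => parts ++ [n]))

def pvStepSegA (acc : Option (List (List String))) (seg : String) : Option (List (List String)) :=
  acc.bind (fun es => (pvSegOptionsA seg).map (fun l => es ++ [l]))

def pvStepSegB (acc? : Option (List String)) (seg : String) : Option (List String) :=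
  acc?.bind (fun acc => (pvSegOptionsB seg).map (fun opts =>
    acc.flatMap (fun p => opts.map (fun o => p ++ "." ++ o))))

def pvStepPrefix (acc opts : List String) : List String :=
  acc.flatMap (fun p => opts.map (fun o => p ++ "." ++ o))

def pvTrav : List String → Option (List (List String))
  | [] => some []
  | s :: t => (pvSegOptionsB s).bind (fun L => (pvTrav t).map (L :: ·))

theorem pv_portA_named (ip : String) : expand_ip_pattern ip =
    (match ((PySem.Str.split? ip ".").getD []).foldl pvStepSegA (some []) with
     | none => []
     | some es => (pvProductA es).foldl (fun ips comb => ips ++ [PySem.Str.join "." comb]) []) := rfl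

theorem pv_portB_named (ip : String) : expand_ip_pattern_alt ip =
    (match (PySem.Str.split? ip ".").getD [] with
     | [] => []
     | s0 :: rest => (rest.foldl pvStepSegB (pvSegOptionsB s0)).getD []) := rfl

-- str.split never returns [] (its worker `go` always reverses a nonempty accumulator)
theorem pv_go_ne_nil (sep : List Char) :
    ∀ fuel l cur acc, PySem.Chars.splitOn.go sep fuel l cur acc ≠ [] := by
  intro fuel
  induction fuel with
  | zero => intro l cur acc; simp [PySem.Chars.splitOn.go]
  | succ n ih =>
    intro l cur acc
    cases l with
    | nil => simp [PySem.Chars.splitOn.go]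
    | cons c rest =>
      rw [PySem.Chars.splitOn.go]
      split
      · exact ih _ _ _
      · exact ih _ _ _

theorem pv_split_dot (s : String) :
    ∃ segs, PySem.Str.split? s "." = some segs ∧ segs ≠ [] := by
  refine ⟨(PySem.Chars.splitOn s.toList ['.']).map String.ofList, ?_, ?_⟩
  · simp [PySem.Str.split?, PySem.Chars.split?]
  · simp [PySem.Chars.splitOn]
    exact fun h => pv_go_ne_nil _ _ _ _ _ h

-- '.'.join facts
theorem pv_join_singleton (x : String) : PySem.Str.join "." [x] = x := by
  apply String.toList_inj.mp
  simp [PySem.Str.toList_join, PySem.Chars.join_singleton]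

theorem pv_join_pair (x y : String) (r : List String) :
    PySem.Str.join "." ((x ++ "." ++ y) :: r) = PySem.Str.join "." (x :: y :: r) := by
  apply String.toList_inj.mp
  cases r with
  | nil =>
    simp [PySem.Str.toList_join, PySem.Chars.join_singleton, PySem.Chars.join_cons_cons,
      String.toList_append]
  | cons z t =>
    simp [PySem.Str.toList_join, PySem.Chars.join_cons_cons, String.toList_append]

-- A's accumulating item loop computes the flattened item_values
theorem pv_stepItemA_vals (parts : List Int) (i : String) :
    pvStepItemA (some parts) i = (pvItemVals i).map (fun vs => parts ++ vs) := by
  unfold pvStepItemA pvItemVals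
  simp only [Option.bind_some]
  split_ifs with hc
  · cases hsp : PySem.Str.split? (PySem.Str.strip i) "-" with
    | none => rfl
    | some l =>
      match l with
      | [] => rfl
      | [a] => rfl
      | a :: b :: c :: r => rfl
      | [lo, hi] =>
        cases ha : PySem.Int.ofStr? lo with
        | none => simp [ha]
        | some a =>
          cases hb : PySem.Int.ofStr? hi with
          | none => simp [ha, hb]
          | some b => simp [ha, hb]
  · cases ho : PySem.Int.ofStr? (PySem.Str.strip i) with
    | none => rfl
    | some n => simp

theorem pv_foldItemA_none : ∀ t : List String, t.foldl pvStepItemA none = none := by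
  intro t
  induction t with
  | nil => rfl
  | cons s r ih => rw [List.foldl_cons]; exact ih

theorem pv_fold_items_vals (items : List String) :
    ∀ parts : List Int,
    items.foldl pvStepItemA (some parts) =
    (pvItemValsList items).map (fun vss => parts ++ vss.flatten) := by
  induction items with
  | nil => intro parts; simp [pvItemValsList]
  | cons i t ih =>
    intro parts
    rw [List.foldl_cons, pv_stepItemA_vals]
    cases hv : pvItemVals i with
    | none => simp only [Option.map_none]; rw [pv_foldItemA_none]; simp [pvItemValsList, hv]
    | some vs =>
      simp only [Option.map_some]
      rw [ih]
      simp only [pvItemValsList, hv, Option.bind_some]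
      cases pvItemValsList t <;> simp

theorem pv_seg_eq (seg : String) : pvSegOptionsA seg = pvSegOptionsB seg := by
  unfold pvSegOptionsA pvSegOptionsB
  split_ifs with h
  · show (List.foldl pvStepItemA (some []) _).map _ = _
    rw [pv_fold_items_vals]
    cases pvItemValsList _ <;> simp
  · rfl

theorem pv_foldSegA_none : ∀ t : List String, t.foldl pvStepSegA none = none := by
  intro t
  induction t with
  | nil => rfl
  | cons s r ih => rw [List.foldl_cons]; exact ih

theorem pv_foldSegB_none : ∀ t : List String, t.foldl pvStepSegB none = none := by
  intro t
  induction t with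
  | nil => rfl
  | cons s r ih => rw [List.foldl_cons]; exact ih

theorem pv_foldA_trav (rest : List String) :
    ∀ es0 : List (List String),
    rest.foldl pvStepSegA (some es0) = (pvTrav rest).map (fun Ls => es0 ++ Ls) := by
  induction rest with
  | nil => intro es0; simp [pvTrav]
  | cons s t ih =>
    intro es0
    rw [List.foldl_cons]
    have h0 : pvStepSegA (some es0) s = (pvSegOptionsB s).map (fun l => es0 ++ [l]) := by
      simp [pvStepSegA, pv_seg_eq]
    rw [h0]
    cases hB : pvSegOptionsB s with
    | none => simp only [Option.map_none]; rw [pv_foldSegA_none]; simp [pvTrav, hB]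
    | some L =>
      simp only [Option.map_some]
      rw [ih]
      simp only [pvTrav, hB, Option.bind_some]
      cases pvTrav t <;> simp

theorem pv_foldB_trav (rest : List String) :
    ∀ a0 : List String,
    rest.foldl pvStepSegB (some a0) = (pvTrav rest).map (fun Ls => Ls.foldl pvStepPrefix a0) := by
  induction rest with
  | nil => intro a0; simp [pvTrav]
  | cons s t ih =>
    intro a0
    rw [List.foldl_cons]
    have h0 : pvStepSegB (some a0) s = (pvSegOptionsB s).map (fun opts => pvStepPrefix a0 opts) := by
      simp [pvStepSegB, pvStepPrefix]
    rw [h0]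
    cases hB : pvSegOptionsB s with
    | none => simp only [Option.map_none]; rw [pv_foldSegB_none]; simp [pvTrav, hB]
    | some L =>
      simp only [Option.map_some]
      rw [ih]
      simp only [pvTrav, hB, Option.bind_some]
      cases pvTrav t <;> simp

theorem pv_map_join_single (L : List String) :
    (L.flatMap (fun x => [[x]])).map (fun c => PySem.Str.join "." c) = L := by
  induction L with
  | nil => rfl
  | cons x t ih => simp [List.flatMap_cons, pv_join_singleton, ih]

-- joining the product = folding partial prefixes
theorem pv_prod_join (Ls : List (List String)) :
    ∀ L : List String,
    (pvProductA (L :: Ls)).map (fun c => PySem.Str.join "." c) = Ls.foldl pvStepPrefix L := by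
  induction Ls with
  | nil =>
    intro L
    simp only [pvProductA, List.foldl_nil]
    exact pv_map_join_single L
  | cons l ls ih =>
    intro L
    rw [List.foldl_cons, ← ih (pvStepPrefix L l)]
    show (pvProductA (L :: l :: ls)).map _ = (pvProductA (_ :: ls)).map _
    simp only [pvProductA, pvStepPrefix, List.map_flatMap, List.map_map, Function.comp_def]
    simp [List.flatMap_assoc, List.flatMap_map, pv_join_pair]

-- ===== VERDICT (by name: the statement is the Claim_ definition above) =====
theorem expand_ip_pattern_spec : Claim_equal_expand_ip_pattern := by
  intro ip _ _
  unfold Spec_expand_ip_pattern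
  rw [pv_portA_named, pv_portB_named]
  obtain ⟨segs, hs, hne⟩ := pv_split_dot ip
  rw [hs]
  simp only [Option.getD_some]
  cases segs with
  | nil => exact absurd rfl hne
  | cons s0 rest =>
    rw [List.foldl_cons]
    have h0 : pvStepSegA (some []) s0 = (pvSegOptionsB s0).map (fun l => [l]) := by
      simp [pvStepSegA, pv_seg_eq]
    rw [h0]
    cases hB : pvSegOptionsB s0 with
    | none =>
      simp only [Option.map_none]
      rw [pv_foldSegA_none, hB, pv_foldSegB_none]
      rfl
    | some L0 =>
      simp only [Option.map_some]
      rw [pv_foldA_trav, hB, pv_foldB_trav]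
      cases ht : pvTrav rest with
      | none => rfl
      | some Ls =>
        simp only [Option.map_some, Option.getD_some]
        rw [PySem.List.foldl_append_singleton_eq_map]
        simpa using pv_prod_join Ls L0
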